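-- pv_equiv track=rewrite | github.com/heitortanoue/space-cruise-db | utils.py | get_query_fields
-- ===== SOURCE A (Python) =====
-- def get_query_fields(query):
--     """Retorna os campos personalizaveis de uma consulta ({{campo}})."""
--     fields = []
--     start = 0
--     while True:
--         start = query.find("{{", start)
--         if start == -1:
--             break
--         end = query.find("}}", start)
--         if end == -1:
--             break
--         fields.append(query[start + 2:end])
--         start = end + 2
--     return fields
-- ===== SOURCE B (Python) =====
-- def get_query_fields(query):
--     """Retorna os campos personalizaveis de uma consulta ({{campo}})."""
--     fields = []
--     buf = None  # None = outside a field; else list of chars of the current field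
--     i = 0
--     while i < len(query) - 1:
--         pair = query[i:i + 2]
--         if buf is None:
--             if pair == "{{":
--                 buf = []
--                 i += 2
--             else:
--                 i += 1
--         else:
--             if pair == "}}":
--                 fields.append("".join(buf))
--                 buf = None
--                 i += 2
--             else:
--                 buf.append(query[i])
--                 i += 1
--     return fields
-- ===== Notes on version B (the rewrite author's own statement) =====
-- stated objective: alternative
-- what changed: Replaces A's repeated str.find jumps plus slicing with a single left-to-right two-state character scan (outside/inside a field) that buffers field characters and emits the buffer at each closing delimiter.
import Mathlib
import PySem

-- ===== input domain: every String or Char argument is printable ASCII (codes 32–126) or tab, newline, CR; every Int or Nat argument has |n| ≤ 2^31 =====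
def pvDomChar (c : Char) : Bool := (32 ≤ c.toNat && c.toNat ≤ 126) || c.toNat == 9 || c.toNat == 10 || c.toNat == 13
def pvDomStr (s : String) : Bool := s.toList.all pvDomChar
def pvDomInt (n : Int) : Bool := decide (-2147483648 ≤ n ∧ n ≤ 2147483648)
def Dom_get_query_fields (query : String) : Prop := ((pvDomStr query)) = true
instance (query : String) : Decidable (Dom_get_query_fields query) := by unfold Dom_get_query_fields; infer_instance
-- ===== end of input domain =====

-- B replaces A's repeated str.find/slice loop by a single two-state character scan (objective: alternative).

-- ===== PORT A =====
-- A's while-loop, transliterated with an explicit fuel bound (length+1 always suffices: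
-- each iteration advances start by at least 2 and stops once start passes the end).
def pvLoopA (cs : List Char) (fuel : Nat) (fields : List String) (start : Nat) : List String :=
  match fuel with
  | 0 => fields
  | fuel + 1 =>
    let s := PySem.Chars.findFrom cs ['{', '{'] (start : Int) none   -- start = query.find("{{", start)
    if s = -1 then fields
    else
      let e := PySem.Chars.findFrom cs ['}', '}'] s none             -- end = query.find("}}", start)
      if e = -1 then fields
      else
        pvLoopA cs fuel
          (fields ++ [String.ofList (PySem.List.slice cs (some (s + 2)) (some e))])  -- fields.append(query[start+2:end])
          (e.toNat + 2)                                                               -- start = end + 2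

def get_query_fields (query : String) : List String :=
  pvLoopA query.toList (query.toList.length + 1) [] 0

-- ===== PORT B =====
-- Source B's single pass: pvScanB is the `buf is None` state, pvScanField the in-field state
-- (i += 1 / i += 2 become dropping one / two chars of the remaining suffix).
mutual
def pvScanB : List Char → List (List Char)
  | c1 :: c2 :: rest =>
    if c1 = '{' ∧ c2 = '{' then pvScanField rest [] else pvScanB (c2 :: rest)
  | _ => []
termination_by cs => cs.length
def pvScanField : List Char → List Char → List (List Char)
  | c1 :: c2 :: rest, buf =>
    if c1 = '}' ∧ c2 = '}' then buf :: pvScanB rest else pvScanField (c2 :: rest) (buf ++ [c1])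
  | _, _ => []
termination_by cs _ => cs.length
end

def get_query_fields_alt (query : String) : List String :=
  (pvScanB query.toList).map String.ofList

-- ===== PRECONDITION & SPEC =====
def Spec_get_query_fields (query : String) (out : List String) : Prop := out = get_query_fields_alt query
instance (query : String) (out : List String) : Decidable (Spec_get_query_fields query out) := by unfold Spec_get_query_fields; infer_instance

-- ===== CLAIM (what is proved, stated in full; the proofs are below) =====
def Claim_equal_get_query_fields : Prop := ∀ (query : String), Dom_get_query_fields query → Spec_get_query_fields query (get_query_fields query)

-- ===== LEMMAS AND PROOFS =====

lemma pvScanB_step (c : Char) (cs : List Char) (h : ¬ ['{', '{'] <+: (c :: cs)) :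
    pvScanB (c :: cs) = pvScanB cs := by
  cases cs with
  | nil => simp [pvScanB]
  | cons c2 rest =>
    rw [pvScanB, if_neg]
    rintro ⟨h1, h2⟩
    exact h (by simp [h1, h2, List.cons_prefix_cons])

lemma pvScanField_step (c : Char) (cs : List Char) (buf : List Char)
    (h : ¬ ['}', '}'] <+: (c :: cs)) :
    pvScanField (c :: cs) buf = pvScanField cs (buf ++ [c]) := by
  cases cs with
  | nil => simp [pvScanField]
  | cons c2 rest =>
    rw [pvScanField, if_neg]
    rintro ⟨h1, h2⟩
    exact h (by simp [h1, h2, List.cons_prefix_cons])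

lemma pvScanB_no (cs : List Char) (h : ¬ ['{', '{'] <:+: cs) : pvScanB cs = [] := by
  induction cs with
  | nil => simp [pvScanB]
  | cons c rest ih =>
    rw [pvScanB_step c rest (fun hp => h hp.isInfix)]
    exact ih (fun hi => h (List.infix_cons hi))

lemma pvScanField_no (cs : List Char) (h : ¬ ['}', '}'] <:+: cs) :
    ∀ buf, pvScanField cs buf = [] := by
  induction cs with
  | nil => intro buf; simp [pvScanField]
  | cons c rest ih =>
    intro buf
    rw [pvScanField_step c rest buf (fun hp => h hp.isInfix)]
    exact ih (fun hi => h (List.infix_cons hi)) _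

lemma pvScanB_skip (p : Nat) : ∀ (cs : List Char),
    (∀ i < p, ¬ ['{', '{'] <+: cs.drop i) → pvScanB cs = pvScanB (cs.drop p) := by
  induction p with
  | zero => intro cs _; simp
  | succ p ih =>
    intro cs h
    cases cs with
    | nil => simp
    | cons c rest =>
      rw [pvScanB_step c rest (by simpa using h 0 (by omega))]
      rw [ih rest (fun i hi => by simpa using h (i + 1) (by omega))]
      simp

lemma pvScanField_found (r : Nat) : ∀ (cs : List Char) (buf : List Char),
    (∀ i < r, ¬ ['}', '}'] <+: cs.drop i) → ['}', '}'] <+: cs.drop r →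
    pvScanField cs buf = (buf ++ cs.take r) :: pvScanB (cs.drop (r + 2)) := by
  induction r with
  | zero =>
    intro cs buf _ hr
    simp only [List.drop_zero] at hr
    obtain ⟨t, ht⟩ := hr
    subst ht
    simp [pvScanField]
  | succ r ih =>
    intro cs buf hmin hr
    cases cs with
    | nil => simp at hr
    | cons c rest =>
      rw [pvScanField_step c rest buf (by simpa using hmin 0 (by omega))]
      rw [ih rest (buf ++ [c]) (fun i hi => by simpa using hmin (i + 1) (by omega))
          (by simpa using hr)]
      simp

lemma pvScanB_open (t : List Char) : pvScanB ('{' :: '{' :: t) = pvScanField t [] := by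
  rw [pvScanB]
  simp

lemma pvLoopA_eq (fuel : Nat) : ∀ (cs : List Char) (start : Nat) (fields : List String),
    start ≤ cs.length → cs.length - start < 2 * fuel + 1 →
    pvLoopA cs fuel fields start = fields ++ (pvScanB (cs.drop start)).map String.ofList := by
  induction fuel with
  | zero =>
    intro cs start fields hstart hfuel
    have : start = cs.length := by omega
    subst this
    simp [pvLoopA, pvScanB]
  | succ fuel ih =>
    intro cs start fields hstart hfuel
    rw [pvLoopA]
    simp only [PySem.Chars.findFrom_natCast cs ['{','{'] start hstart]
    by_cases h1 : PySem.Chars.find (cs.drop start) ['{', '{'] = -1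
    · rw [if_pos (by simp [h1])]
      rw [pvScanB_no _ (by rwa [← PySem.Chars.find_eq_neg_one_iff])]
      simp
    · have h1' : 0 ≤ PySem.Chars.find (cs.drop start) ['{', '{'] := by
        have := PySem.Chars.neg_one_le_find (cs.drop start) ['{', '{']
        omega
      obtain ⟨hpre, hmin⟩ := PySem.Chars.find_spec h1'
      obtain ⟨p, hp⟩ : ∃ p : Nat, PySem.Chars.find (cs.drop start) ['{', '{'] = (p : Int) :=
        ⟨_, (Int.toNat_of_nonneg h1').symm⟩
      rw [hp] at hpre hmin
      simp only [Int.toNat_natCast] at hpre hmin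
      rw [hp]
      simp only [if_neg (show ¬((p : Int) = -1) by omega),
        show (start : Int) + (p : Int) = ((start + p : Nat) : Int) by push_cast; ring]
      rw [if_neg (show ¬(((start + p : Nat) : Int) = -1) by omega)]
      rw [List.drop_drop] at hpre
      have hlen2 : start + p + 2 ≤ cs.length := by
        have h := hpre.length_le
        simp at h
        omega
      rw [PySem.Chars.findFrom_natCast cs ['}', '}'] (start + p) (by omega)]
      have hskip : pvScanB (cs.drop start) = pvScanB (cs.drop (start + p)) := by
        rw [pvScanB_skip p (cs.drop start) (fun i hi => hmin i hi), List.drop_drop]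
      obtain ⟨t, ht⟩ := hpre
      have ht' : cs.drop (start + p) = '{' :: '{' :: t := by rw [← ht]; rfl
      by_cases h2 : PySem.Chars.find (cs.drop (start + p)) ['}', '}'] = -1
      · rw [if_pos (by simp [h2])]
        have hnoin : ¬ ['}', '}'] <:+: cs.drop (start + p) :=
          (PySem.Chars.find_eq_neg_one_iff _ _).mp h2
        rw [hskip, ht', pvScanB_open]
        rw [pvScanField_no t (fun hin => hnoin (ht ▸ (List.infix_cons (List.infix_cons hin)))) []]
        simp
      · have h2' : 0 ≤ PySem.Chars.find (cs.drop (start + p)) ['}', '}'] := by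
          have := PySem.Chars.neg_one_le_find (cs.drop (start + p)) ['}', '}']
          omega
        obtain ⟨hpre2, hmin2⟩ := PySem.Chars.find_spec h2'
        obtain ⟨r, hr⟩ : ∃ r : Nat, PySem.Chars.find (cs.drop (start + p)) ['}', '}'] = (r : Int) :=
          ⟨_, (Int.toNat_of_nonneg h2').symm⟩
        rw [hr] at hpre2 hmin2
        simp only [Int.toNat_natCast] at hpre2 hmin2
        rw [hr]
        simp only [if_neg (show ¬((r : Int) = -1) by omega),
          show ((start + p : Nat) : Int) + (r : Int) = ((start + p + r : Nat) : Int) by push_cast; ring]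
        rw [if_neg (show ¬(((start + p + r : Nat) : Int) = -1) by omega)]
        rw [List.drop_drop] at hpre2
        have hlen3 : start + p + r + 2 ≤ cs.length := by
          have h := hpre2.length_le
          simp at h
          omega
        have hr2 : 2 ≤ r := by
          rcases (by omega : r = 0 ∨ r = 1 ∨ 2 ≤ r) with h | h | h
          · subst h
            rw [show start + p + 0 = start + p by ring, ht'] at hpre2
            simp [List.cons_prefix_cons] at hpre2
          · subst h
            have hdtail : cs.drop (start + p + 1) = '{' :: t := by
              have h5 := congrArg (List.drop 1) ht'
              rw [List.drop_drop] at h5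
              simpa using h5
            rw [hdtail] at hpre2
            simp [List.cons_prefix_cons] at hpre2
          · exact h
        rw [show ((start + p : Nat) : Int) + 2 = ((start + p + 2 : Nat) : Int) by push_cast; ring]
        rw [PySem.List.slice_natCast, Int.toNat_natCast]
        rw [show start + p + r - (start + p + 2) = r - 2 by omega]
        rw [ih cs (start + p + r + 2) _ (by omega) (by omega)]
        have htt : cs.drop (start + p + 2) = t := by
          have h := congrArg (List.drop 2) ht'
          rw [List.drop_drop] at h
          simpa using h
        have hfound : pvScanField t [] =
            (([] : List Char) ++ t.take (r - 2)) :: pvScanB (t.drop ((r - 2) + 2)) := by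
          apply pvScanField_found (r - 2) t []
          · intro i hi
            have h3 : t.drop i = (cs.drop (start + p)).drop (i + 2) := by
              rw [ht']
              simp
            rw [h3]
            exact hmin2 (i + 2) (by omega)
          · have h4 : t.drop (r - 2) = (cs.drop (start + p)).drop r := by
              rw [ht', show r = (r - 2) + 2 by omega]
              simp
            rw [h4, List.drop_drop, show start + p + r = (start + p) + r by ring]
            exact hpre2
        have hdrop3 : t.drop ((r - 2) + 2) = cs.drop (start + p + r + 2) := by
          have h := congrArg (List.drop (r + 2)) ht'
          rw [List.drop_drop] at h
          simp at h
          rw [show (r - 2) + 2 = r by omega, show start + p + r + 2 = start + p + (r + 2) by ring]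
          exact h.symm
        rw [hskip, ht', pvScanB_open, hfound, hdrop3, htt]
        simp

-- ===== VERDICT (by name: the statement is the Claim_ definition above) =====
theorem get_query_fields_spec : Claim_equal_get_query_fields := by
  intro query _
  unfold Spec_get_query_fields get_query_fields get_query_fields_alt
  rw [pvLoopA_eq (query.toList.length + 1) query.toList 0 [] (by omega) (by omega)]
  simp
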